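-- pv_equiv track=rewrite | github.com/cirosantilli/project-euler-solvers | solvers/408.py | generate_obstacles
-- ===== SOURCE A (Python) =====
-- import math
-- from typing import List, Tuple
--
-- def generate_obstacles(n: int) -> List[Tuple[int, int]]:
--     m = int(math.isqrt(n))
--     squares = [i * i for i in range(1, m + 1)]
--     max_sum_root = int(math.isqrt(2 * n))
--     sum_squares = set(i * i for i in range(1, max_sum_root + 1))
--
--     obstacles: List[Tuple[int, int]] = []
--     append = obstacles.append
--     contains = sum_squares.__contains__
--     for a2 in squares:
--         for b2 in squares:
--             if contains(a2 + b2):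
--                 append((a2, b2))
--
--     obstacles.sort(key=lambda p: (p[0] + p[1], p[0]))
--     return obstacles
-- ===== SOURCE B (Python) =====
-- import math
-- from typing import List, Tuple
--
--
-- def generate_obstacles(n: int) -> List[Tuple[int, int]]:
--     # Walk the hypotenuses c in increasing order and, for each c, the legs a in
--     # increasing order: the output comes out already sorted by (a*a + b*b, a*a),
--     # so the sort pass and the square-set lookups disappear.
--     m = math.isqrt(n)
--     out: List[Tuple[int, int]] = []
--     for c in range(1, math.isqrt(2 * n) + 1):
--         c2 = c * c
--         for a in range(1, m + 1):
--             b2 = c2 - a * a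
--             if b2 < 1:
--                 break
--             b = math.isqrt(b2)
--             if b * b == b2 and b <= m:
--                 out.append((a * a, b2))
--     return out
-- ===== Notes on version B (the rewrite author's own statement) =====
-- stated objective: alternative
-- what changed: Instead of testing every square pair against a precomputed set of square sums and sorting at the end, B walks the hypotenuses c = 1..isqrt(2n) in increasing order and, for each c, the legs a in increasing order (stopping when c^2 - a^2 < 1), emitting (a^2, c^2 - a^2) when the co-leg is a square with root at most isqrt(n) -- the output is produced already in A's (sum, first) sort order, so the sort pass and the square-set disappear.
-- outside the precondition, e.g. on generate_obstacles(-1): A raises ValueError, B raises ValueError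
import Mathlib
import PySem

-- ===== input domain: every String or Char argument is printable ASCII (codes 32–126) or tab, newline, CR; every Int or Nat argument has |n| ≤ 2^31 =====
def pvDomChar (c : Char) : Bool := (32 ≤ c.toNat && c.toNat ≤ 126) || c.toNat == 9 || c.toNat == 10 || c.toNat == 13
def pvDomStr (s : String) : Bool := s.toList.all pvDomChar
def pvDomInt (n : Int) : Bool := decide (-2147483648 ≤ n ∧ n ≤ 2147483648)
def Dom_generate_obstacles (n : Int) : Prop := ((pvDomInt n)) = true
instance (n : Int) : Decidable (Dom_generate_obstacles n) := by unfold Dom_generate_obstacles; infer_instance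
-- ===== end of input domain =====

-- B walks hypotenuses c in increasing order and legs a in increasing order, emitting the
-- pairs already in A's sort order: the sort pass and the square-set disappear (objective:
-- alternative; not measured faster).

-- math.isqrt(i); exact for 0 ≤ i (Python raises ValueError for i < 0, excluded by Pre_)
def pyIsqrt (i : Int) : Int := ((i.toNat).sqrt : Nat)

-- ===== PORT A =====
def generate_obstacles (n : Int) : List (Int × Int) :=
  let m := pyIsqrt n
  let squares := (PySem.List.pyRange 1 (m + 1) 1).map (fun i => i * i)
  let maxSumRoot := pyIsqrt (2 * n)
  let sumSquares : PySem.Set Int :=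
    PySem.Set.ofList ((PySem.List.pyRange 1 (maxSumRoot + 1) 1).map (fun i => i * i))
  let obstacles :=
    squares.foldl (fun acc a2 =>
      squares.foldl (fun acc b2 =>
        if PySem.Set.contains sumSquares (a2 + b2) then acc ++ [(a2, b2)] else acc) acc)
      ([] : List (Int × Int))
  PySem.List.sorted2 obstacles (fun p => p.1 + p.2) (fun p => p.1)

-- ===== PORT B =====
-- the inner 'for a in range(1, m+1)' of Source B, with its 'break' as early exit
def altInner (m c2 : Int) : List Int → List (Int × Int)
  | [] => []
  | a :: rest =>
    let b2 := c2 - a * a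
    if b2 < 1 then []
    else
      let b := pyIsqrt b2
      if b * b = b2 ∧ b ≤ m then (a * a, b2) :: altInner m c2 rest
      else altInner m c2 rest

def generate_obstacles_alt (n : Int) : List (Int × Int) :=
  let m := pyIsqrt n
  (PySem.List.pyRange 1 (pyIsqrt (2 * n) + 1) 1).foldl
    (fun out c => out ++ altInner m (c * c) (PySem.List.pyRange 1 (m + 1) 1))
    ([] : List (Int × Int))

-- ===== PRECONDITION & SPEC =====
-- math.isqrt raises ValueError on negative input, so A (and B) return only for 0 ≤ n.
def Pre_generate_obstacles (n : Int) : Prop := 0 ≤ n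
instance (n : Int) : Decidable (Pre_generate_obstacles n) := by
  unfold Pre_generate_obstacles; infer_instance

def pvWitness_generate_obstacles : Int := (30)

def Spec_generate_obstacles (n : Int) (out : List (Int × Int)) : Prop :=
  out = generate_obstacles_alt n
instance (n : Int) (out : List (Int × Int)) : Decidable (Spec_generate_obstacles n out) := by
  unfold Spec_generate_obstacles; infer_instance

-- ===== CLAIM (what is proved, stated in full; the proofs are below) =====
def Claim_equal_generate_obstacles : Prop :=
  ∀ (n : Int), Dom_generate_obstacles n → Pre_generate_obstacles n →
    Spec_generate_obstacles n (generate_obstacles n)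

-- ===== LEMMAS AND PROOFS =====

-- the sort key of A, as a single lexicographic key
def pvKey (p : Int × Int) : Lex (Int × Int) := toLex (p.1 + p.2, p.1)

-- A's pre-sort list, in flatMap form
def pvLA (n : Int) : List (Int × Int) :=
  let m := pyIsqrt n
  let squares := (PySem.List.pyRange 1 (m + 1) 1).map (fun i => i * i)
  let sumSquares : PySem.Set Int :=
    PySem.Set.ofList ((PySem.List.pyRange 1 (pyIsqrt (2 * n) + 1) 1).map (fun i => i * i))
  squares.flatMap (fun a2 =>
    (squares.filter (fun b2 => PySem.Set.contains sumSquares (a2 + b2))).map (fun b2 => (a2, b2)))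

-- B's list, in flatMap form
def pvLB (n : Int) : List (Int × Int) :=
  let m := pyIsqrt n
  (PySem.List.pyRange 1 (pyIsqrt (2 * n) + 1) 1).flatMap
    (fun c => altInner m (c * c) (PySem.List.pyRange 1 (m + 1) 1))

-- the filter condition B's inner loop realises
def pvP (m c2 a : Int) : Bool :=
  decide (1 ≤ c2 - a * a) &&
    decide (pyIsqrt (c2 - a * a) * pyIsqrt (c2 - a * a) = c2 - a * a ∧
            pyIsqrt (c2 - a * a) ≤ m)

lemma pvIsqrt_nonneg (i : Int) : 0 ≤ pyIsqrt i := by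
  unfold pyIsqrt; exact Int.natCast_nonneg _

lemma pvIsqrt_sq (b : Int) (hb : 0 ≤ b) : pyIsqrt (b * b) = b := by
  unfold pyIsqrt
  rw [Int.toNat_mul hb hb, ← Nat.pow_two, Nat.sqrt_eq', Int.toNat_of_nonneg hb]

lemma pvBeforeEq : (fun (a b : Int × Int) =>
      decide (a.1 + a.2 < b.1 + b.2) ||
        (!decide (b.1 + b.2 < a.1 + a.2) && decide (a.1 < b.1)))
    = fun a b => decide (pvKey a < pvKey b) := by
  funext a b
  rw [Bool.eq_iff_iff]
  simp only [Bool.or_eq_true, Bool.and_eq_true, Bool.not_eq_true',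
    decide_eq_true_eq, decide_eq_false_iff_not, pvKey, Prod.Lex.lt_iff, ofLex_toLex]
  constructor <;> intro h <;> omega

lemma pvA_eq_sorted (n : Int) :
    generate_obstacles n = PySem.List.sorted (pvLA n) pvKey := by
  unfold generate_obstacles pvLA
  simp only [PySem.List.foldl_append_if, PySem.List.foldl_append_eq_flatMap,
    List.nil_append, PySem.List.sorted2, PySem.List.sorted, if_neg, Bool.false_eq_true,
    not_false_iff, pvBeforeEq]

lemma pvB_eq_LB (n : Int) : generate_obstacles_alt n = pvLB n := by
  unfold generate_obstacles_alt pvLB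
  simp only [PySem.List.foldl_append_eq_flatMap, List.nil_append]

lemma pvSqLeSq {x y : Int} (hx : 0 ≤ x) (hxy : x ≤ y) : x * x ≤ y * y :=
  mul_le_mul hxy hxy hx (le_trans hx hxy)

lemma pvSqLtSq {x y : Int} (hx : 0 ≤ x) (hxy : x < y) : x * x < y * y := by
  nlinarith

lemma pvAltInner_eq (m c2 : Int) (l : List Int) (hpos : ∀ x ∈ l, 1 ≤ x)
    (hsort : l.Pairwise (· ≤ ·)) :
    altInner m c2 l = (l.filter (pvP m c2)).map (fun a => (a * a, c2 - a * a)) := by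
  induction l with
  | nil => rfl
  | cons a rest ih =>
    rw [List.pairwise_cons] at hsort
    by_cases h1 : c2 - a * a < 1
    · have hnil : (a :: rest).filter (pvP m c2) = [] := by
        rw [List.filter_eq_nil_iff]
        intro x hx
        have hx1 : ¬ (1 ≤ c2 - x * x) := by
          rcases List.mem_cons.1 hx with h | h
          · subst h; omega
          · have hax : a ≤ x := hsort.1 x h
            have ha1 : 1 ≤ a := hpos a (List.mem_cons_self)
            have := pvSqLeSq (by omega) hax
            omega
        simp only [pvP, Bool.and_eq_true, decide_eq_true_eq]
        exact fun hcon => absurd hcon.1 hx1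
      rw [hnil]
      simp only [altInner]
      rw [if_pos h1]
      rfl
    · have ih' := ih (fun x hx => hpos x (List.mem_cons_of_mem a hx)) hsort.2
      unfold altInner
      rw [if_neg h1]
      by_cases h2 : pyIsqrt (c2 - a * a) * pyIsqrt (c2 - a * a) = c2 - a * a ∧
          pyIsqrt (c2 - a * a) ≤ m
      · rw [if_pos h2]
        have hp : pvP m c2 a = true := by simp [pvP]; exact ⟨by omega, h2.1, h2.2⟩
        rw [List.filter_cons_of_pos hp, List.map_cons, ih']
      · rw [if_neg h2]
        have hp : pvP m c2 a = false := by
          simp only [pvP, Bool.and_eq_false_iff, decide_eq_false_iff_not]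
          right; exact h2
        rw [List.filter_cons_of_neg (by simp [hp]), ih']

lemma pvMemLA (n : Int) (p : Int × Int) :
    p ∈ pvLA n ↔ ∃ a b c : Int, 1 ≤ a ∧ a ≤ pyIsqrt n ∧ 1 ≤ b ∧ b ≤ pyIsqrt n ∧
      1 ≤ c ∧ c ≤ pyIsqrt (2 * n) ∧ a * a + b * b = c * c ∧ p = (a * a, b * b) := by
  simp only [pvLA, List.mem_flatMap, List.mem_map, List.mem_filter,
    PySem.Set.contains_iff, PySem.Set.mem_ofList, PySem.List.mem_pyRange_one]
  constructor
  · rintro ⟨a2, ⟨a, ⟨ha1, ha2⟩, rfl⟩, b2, ⟨⟨b, ⟨hb1, hb2⟩, rfl⟩, c, ⟨hc1, hc2⟩, hcc⟩, rfl⟩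
    exact ⟨a, b, c, ha1, by omega, hb1, by omega, hc1, by omega, hcc.symm, rfl⟩
  · rintro ⟨a, b, c, ha1, ha2, hb1, hb2, hc1, hc2, habc, rfl⟩
    exact ⟨a * a, ⟨a, ⟨ha1, by omega⟩, rfl⟩,
      ⟨b * b, ⟨⟨b, ⟨hb1, by omega⟩, rfl⟩, c, ⟨hc1, by omega⟩, habc.symm⟩, rfl⟩⟩

lemma pvMemLB (n : Int) (p : Int × Int) :
    p ∈ pvLB n ↔ ∃ a b c : Int, 1 ≤ a ∧ a ≤ pyIsqrt n ∧ 1 ≤ b ∧ b ≤ pyIsqrt n ∧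
      1 ≤ c ∧ c ≤ pyIsqrt (2 * n) ∧ a * a + b * b = c * c ∧ p = (a * a, b * b) := by
  have hinner : ∀ c2 : Int,
      altInner (pyIsqrt n) c2 (PySem.List.pyRange 1 (pyIsqrt n + 1) 1)
        = ((PySem.List.pyRange 1 (pyIsqrt n + 1) 1).filter (pvP (pyIsqrt n) c2)).map
            (fun a => (a * a, c2 - a * a)) := by
    intro c2
    refine pvAltInner_eq _ _ _ ?_ ?_
    · intro x hx; exact (PySem.List.mem_pyRange_one.1 hx).1
    · exact (PySem.List.pairwise_lt_pyRange_one 1 (pyIsqrt n + 1)).imp (fun h => le_of_lt h)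
  simp only [pvLB, List.mem_flatMap, hinner, List.mem_map, List.mem_filter,
    PySem.List.mem_pyRange_one, pvP, Bool.and_eq_true, decide_eq_true_eq]
  constructor
  · rintro ⟨c, hc, a, ⟨ha, hcond⟩, rfl⟩
    obtain ⟨hb2pos, hsq, hble⟩ := hcond
    have h0 := pvIsqrt_nonneg (c * c - a * a)
    refine ⟨a, pyIsqrt (c * c - a * a), c, ha.1, by omega, by nlinarith, hble,
      hc.1, by omega, by linarith, by rw [hsq]⟩
  · rintro ⟨a, b, c, ha1, ha2, hb1, hb2, hc1, hc2, habc, rfl⟩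
    have hb2' : c * c - a * a = b * b := by linarith
    have hsq : pyIsqrt (c * c - a * a) = b := by rw [hb2']; exact pvIsqrt_sq b (by omega)
    refine ⟨c, ⟨hc1, by omega⟩, a, ⟨⟨ha1, by omega⟩, by nlinarith, by rw [hsq]; omega,
      by rw [hsq]; exact hb2⟩, by rw [hb2']⟩

lemma pvSquaresNodup (n : Int) :
    ((PySem.List.pyRange 1 (pyIsqrt n + 1) 1).map (fun i => i * i)).Nodup := by
  refine List.Nodup.map_on ?_ (PySem.List.nodup_pyRange_one 1 (pyIsqrt n + 1))
  intro x hx y hy hxy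
  have hx1 := (PySem.List.mem_pyRange_one.1 hx).1
  have hy1 := (PySem.List.mem_pyRange_one.1 hy).1
  exact (mul_self_inj (by omega) (by omega)).1 hxy

lemma pvNodupLA (n : Int) : (pvLA n).Nodup := by
  unfold pvLA
  rw [List.nodup_flatMap]
  constructor
  · intro a2 _
    exact List.Nodup.map_on (fun x _ y _ h => (Prod.ext_iff.1 h).2)
      (List.Nodup.filter _ (pvSquaresNodup n))
  · refine ((pvSquaresNodup n).imp ?_)
    intro a2 a2' hne x hx hx'
    simp only [List.mem_map, List.mem_filter] at hx hx'
    obtain ⟨b2, _, rfl⟩ := hx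
    obtain ⟨b2', _, h⟩ := hx'
    exact hne ((Prod.ext_iff.1 h.symm).1)

lemma pvPairwiseLB (n : Int) : (pvLB n).Pairwise (fun p q => pvKey p < pvKey q) := by
  unfold pvLB
  rw [List.pairwise_flatMap]
  have hkey : ∀ (c a : Int), pvKey (a * a, c * c - a * a) = toLex (c * c, a * a) := by
    intro c a; unfold pvKey; simp
  constructor
  · intro c hc
    rw [pvAltInner_eq _ _ _ (fun x hx => (PySem.List.mem_pyRange_one.1 hx).1)
      ((PySem.List.pairwise_lt_pyRange_one 1 (pyIsqrt n + 1)).imp (fun h => le_of_lt h))]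
    rw [List.pairwise_map]
    refine List.Pairwise.filter _ ?_
    refine ((PySem.List.pairwise_lt_pyRange_one 1 (pyIsqrt n + 1)).imp_of_mem ?_)
    intro a a' ha ha' hlt
    have ha1 := (PySem.List.mem_pyRange_one.1 ha).1
    rw [hkey, hkey, Prod.Lex.lt_iff]
    right
    exact ⟨rfl, pvSqLtSq (by omega) hlt⟩
  · refine ((PySem.List.pairwise_lt_pyRange_one 1 (pyIsqrt (2 * n) + 1)).imp_of_mem ?_)
    intro c c' hc hc' hlt x hx y hy
    have hc1 := (PySem.List.mem_pyRange_one.1 hc).1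
    rw [pvAltInner_eq _ _ _ (fun x hx => (PySem.List.mem_pyRange_one.1 hx).1)
      ((PySem.List.pairwise_lt_pyRange_one 1 (pyIsqrt n + 1)).imp (fun h => le_of_lt h))] at hx hy
    simp only [List.mem_map] at hx hy
    obtain ⟨a, _, rfl⟩ := hx
    obtain ⟨a', _, rfl⟩ := hy
    rw [hkey, hkey, Prod.Lex.lt_iff]
    left
    exact pvSqLtSq (by omega) hlt

lemma pvNodupLB (n : Int) : (pvLB n).Nodup := by
  have h := pvPairwiseLB n
  exact (h.imp (fun {p q} hlt => by
    intro he; subst he; exact lt_irrefl _ hlt))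

lemma pvPerm (n : Int) : (pvLB n).Perm (pvLA n) := by
  refine (List.perm_ext_iff_of_nodup (pvNodupLB n) (pvNodupLA n)).2 ?_
  intro p
  rw [pvMemLA, pvMemLB]

-- ===== VERDICT (by name: the statement is the Claim_ definition above) =====
theorem generate_obstacles_spec : Claim_equal_generate_obstacles := by
  intro n _ _
  show generate_obstacles n = generate_obstacles_alt n
  rw [pvA_eq_sorted, pvB_eq_LB]
  exact PySem.List.sorted_eq_of_perm_of_pairwise_lt _ _ _ (pvPerm n) (pvPairwiseLB n)
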